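-- pv_equiv track=rewrite | github.com/HotPizzaYT/TWLHelper | utils/utils.py | web_name
-- ===== SOURCE A (Python) =====
-- def web_name(name):
--     name = name.lower()
--     out = ""
--     for letter in name:
--         if letter in "abcdefghijklmnopqrstuvwxyz0123456789-_":
--             out += letter
--         elif letter in ". ":
--             out += "-"
--     return out
-- ===== SOURCE B (Python) =====
-- import re
--
-- def web_name(name):
--     name = name.lower()
--     name = re.sub(r"[. ]", "-", name)
--     return re.sub(r"[^a-z0-9_-]", "", name)
-- ===== Notes on version B (the rewrite author's own statement) =====
-- stated objective: idiomatic
-- what changed: Replaced the per-character accumulator loop with two whole-string regex substitution passes: dots/spaces become hyphens, then every remaining disallowed character is stripped.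
import Mathlib
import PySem

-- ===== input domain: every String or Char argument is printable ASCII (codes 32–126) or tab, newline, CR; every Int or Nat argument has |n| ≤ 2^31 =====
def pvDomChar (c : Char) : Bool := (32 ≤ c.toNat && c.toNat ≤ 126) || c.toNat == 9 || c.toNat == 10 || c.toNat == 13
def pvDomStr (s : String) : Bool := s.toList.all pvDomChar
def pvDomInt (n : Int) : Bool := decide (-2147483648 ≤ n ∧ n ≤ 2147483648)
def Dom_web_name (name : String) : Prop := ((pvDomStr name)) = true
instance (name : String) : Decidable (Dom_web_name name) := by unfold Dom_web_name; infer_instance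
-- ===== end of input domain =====

-- B replaces A's per-character accumulator loop with two whole-string substitution passes
-- (dots/spaces → '-', then strip disallowed characters); same output, idiomatic two-pass style.

-- ===== PORT A =====
-- A's membership strings, as char lists
def pvAllowedA : List Char := "abcdefghijklmnopqrstuvwxyz0123456789-_".toList
def pvDotSpace : List Char := ". ".toList

def web_name (name : String) : String :=
  String.ofList ((PySem.Str.lower name).toList.foldl (fun out letter =>
    if pvAllowedA.contains letter then out ++ [letter]
    else if pvDotSpace.contains letter then out ++ ['-']
    else out) [])

-- ===== PORT B =====
-- re.sub "[. ]" → "-"  (per-character substitution pass)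
def pvSubHyphen (l : List Char) : List Char :=
  l.map (fun c => if (". ".toList).contains c then '-' else c)
-- re.sub "[^a-z0-9_-]" → ""  (strip pass; keep exactly the character class)
def pvKeepB : List Char := "abcdefghijklmnopqrstuvwxyz0123456789_-".toList
def pvStrip (l : List Char) : List Char := l.filter (fun c => pvKeepB.contains c)

def web_name_alt (name : String) : String :=
  String.ofList (pvStrip (pvSubHyphen (PySem.Str.lower name).toList))

-- ===== PRECONDITION & SPEC =====
def Spec_web_name (name : String) (out : String) : Prop := out = web_name_alt name
instance (name : String) (out : String) : Decidable (Spec_web_name name out) := by unfold Spec_web_name; infer_instance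

-- ===== CLAIM (what is proved, stated in full; the proofs are below) =====
def Claim_equal_web_name : Prop := ∀ (name : String), Dom_web_name name → Spec_web_name name (web_name name)

-- ===== LEMMAS AND PROOFS =====

-- the 36 alphanumeric characters shared by A's and B's classes
def pvAlnum : List Char := "abcdefghijklmnopqrstuvwxyz0123456789".toList

-- A's allowed class and B's keep class hold the same characters ('-' and '_' swapped)
theorem pv_keep_eq_allowed (c : Char) : pvKeepB.contains c = pvAllowedA.contains c := by
  have hp : pvAllowedA.Perm pvKeepB := by
    rw [show pvAllowedA = pvAlnum ++ ['-','_'] from by decide,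
        show pvKeepB = pvAlnum ++ ['_','-'] from by decide]
    exact List.Perm.append_left _ (List.Perm.swap _ _ _)
  rw [Bool.eq_iff_iff]
  simp only [List.contains_iff_mem]
  exact hp.mem_iff.symm

-- B's two passes on the two substituted characters
theorem pv_sub_dot : pvStrip (pvSubHyphen ['.']) = ['-'] := by decide
theorem pv_sub_space : pvStrip (pvSubHyphen [' ']) = ['-'] := by decide

-- one step of A's loop equals B's two passes applied to the single character
theorem pv_step (acc : List Char) (c : Char) :
    (if pvAllowedA.contains c then acc ++ [c]
     else if pvDotSpace.contains c then acc ++ ['-']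
     else acc)
    = acc ++ pvStrip (pvSubHyphen [c]) := by
  by_cases hS : pvDotSpace.contains c = true
  · have hc : c = '.' ∨ c = ' ' := by
      have hm : c ∈ pvDotSpace := List.contains_iff_mem.mp hS
      rw [show pvDotSpace = ['.', ' '] from by decide] at hm
      simpa using hm
    rcases hc with rfl | rfl
    · rw [pv_sub_dot, if_neg (by decide), if_pos (by decide : pvDotSpace.contains '.' = true)]
    · rw [pv_sub_space, if_neg (by decide), if_pos (by decide : pvDotSpace.contains ' ' = true)]
  · have hS' : ((". ".toList).contains c = true) = False := by
      simp only [show (". ".toList) = pvDotSpace from by decide]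
      exact eq_false hS
    have h1 : pvSubHyphen [c] = [c] := by
      simp only [pvSubHyphen, List.map_cons, List.map_nil, hS', if_false]
    by_cases hA : pvAllowedA.contains c = true
    · have hk : pvKeepB.contains c = true := (pv_keep_eq_allowed c).trans hA
      have h2 : pvStrip [c] = [c] := by
        simp only [pvStrip, List.filter_cons, List.filter_nil, hk, if_true]
      rw [h1, h2, if_pos hA]
    · have hA' : pvAllowedA.contains c = false := (Bool.not_eq_true _).mp hA
      have hk : pvKeepB.contains c = false := (pv_keep_eq_allowed c).trans hA'
      have h2 : pvStrip [c] = [] := by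
        simp only [pvStrip, List.filter_cons, List.filter_nil, hk]
        simp
      rw [h1, h2, if_neg hA, if_neg hS, List.append_nil]

-- A's whole fold equals B's two passes, for any accumulator
theorem pv_fold (l : List Char) : ∀ (acc : List Char),
    l.foldl (fun out letter =>
      if pvAllowedA.contains letter then out ++ [letter]
      else if pvDotSpace.contains letter then out ++ ['-']
      else out) acc
    = acc ++ pvStrip (pvSubHyphen l) := by
  induction l with
  | nil => intro acc; simp [pvSubHyphen, pvStrip]
  | cons c l ih =>
      intro acc
      have h1 : pvStrip (pvSubHyphen (c :: l))
          = pvStrip (pvSubHyphen [c]) ++ pvStrip (pvSubHyphen l) := by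
        simp only [pvSubHyphen, List.map_cons, List.map_nil, pvStrip]
        rw [← List.filter_append]
        rfl
      rw [List.foldl_cons, ih, pv_step, h1, List.append_assoc]

-- ===== VERDICT (by name: the statement is the Claim_ definition above) =====
theorem web_name_spec : Claim_equal_web_name := by
  intro name _
  unfold Spec_web_name web_name web_name_alt
  rw [pv_fold, List.nil_append]
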